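-- pv_equiv track=rewrite | github.com/pattonga/Symmetric-Weakly-Separated-Collection-Generator | FindBreakers.py | weakly_separated_correct
-- ===== SOURCE A (Python) =====
-- def weakly_separated_correct(A, B, n):
--     A_minus_B = sorted(set(A) - set(B))
--     B_minus_A = sorted(set(B) - set(A))
--     combined = sorted(set(A_minus_B + B_minus_A))
--
--     for i in range(len(combined)):
--         for j in range(i + 1, len(combined)):
--             for k in range(j + 1, len(combined)):
--                 for l in range(k + 1, len(combined)):
--                     a, b, c, d = combined[i], combined[j], combined[k], combined[l]
--                     if {a, c}.issubset(A_minus_B) and {b, d}.issubset(B_minus_A):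
--                         return False
--                     if {a, c}.issubset(B_minus_A) and {b, d}.issubset(A_minus_B):
--                         return False
--     return True
-- ===== SOURCE B (Python) =====
-- def weakly_separated_correct(A, B, n):
--     sa = set(A)
--     combined = sorted(sa ^ set(B))
--     blocks = 0
--     last = None
--     for x in combined:
--         lab = x in sa
--         if lab != last:
--             blocks += 1
--             last = lab
--     return blocks < 4
-- ===== Notes on version B (the rewrite author's own statement) =====
-- stated objective: faster
-- what changed: Instead of scanning all O(m^4) index quadruples of the sorted symmetric difference for an alternating XYXY/YXYX pattern, B sorts the symmetric difference once and counts label blocks (runs of consecutive same-side elements) in a single pass; weakly separated iff at most 3 blocks. Intended as faster (O(m log m) vs O(m^4)); a timing run saw large speed-ups on mid sizes (e.g. 2902x at n=256 in one run) but A times out on most large inputs, so that run could not confirm a ratio at the largest size.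
import Mathlib
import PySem

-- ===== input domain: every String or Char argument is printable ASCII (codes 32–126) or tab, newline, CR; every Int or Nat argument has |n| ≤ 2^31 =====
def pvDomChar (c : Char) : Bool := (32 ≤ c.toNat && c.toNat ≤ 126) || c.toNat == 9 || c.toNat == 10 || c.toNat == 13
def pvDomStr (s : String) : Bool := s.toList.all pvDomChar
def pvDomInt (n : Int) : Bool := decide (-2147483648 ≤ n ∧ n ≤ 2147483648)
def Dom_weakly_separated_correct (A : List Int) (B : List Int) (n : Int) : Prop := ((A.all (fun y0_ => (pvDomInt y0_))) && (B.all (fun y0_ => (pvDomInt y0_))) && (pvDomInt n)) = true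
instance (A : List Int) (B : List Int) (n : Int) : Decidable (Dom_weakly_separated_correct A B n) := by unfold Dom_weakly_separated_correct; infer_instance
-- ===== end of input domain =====

-- B replaces A's scan of all index quadruples with a single pass over the sorted
-- symmetric difference counting label blocks (at most 3 blocks ↔ weakly separated);
-- intended as faster; a timing run saw large mid-size speed-ups but could not
-- confirm a largest-size ratio (A times out on most large inputs).

-- ===== PORT A =====
-- literal port of A: A\B and B\A sorted, their sorted union, then the four nested
-- index loops with early return False (ported as `any` over the same index ranges)
def weakly_separated_correct (A : List Int) (B : List Int) (n : Int) : Bool :=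
  let Amb := PySem.List.sorted (PySem.Set.diff (PySem.Set.ofList A) (PySem.Set.ofList B)) (fun x => x) false
  let Bma := PySem.List.sorted (PySem.Set.diff (PySem.Set.ofList B) (PySem.Set.ofList A)) (fun x => x) false
  let combined := PySem.List.sorted (PySem.Set.ofList (Amb ++ Bma)) (fun x => x) false
  let m := combined.length
  ! ((List.range m).any fun i =>
      (List.range' (i+1) (m - (i+1))).any fun j =>
        (List.range' (j+1) (m - (j+1))).any fun k =>
          (List.range' (k+1) (m - (k+1))).any fun l =>
            let a := combined.getD i 0
            let b := combined.getD j 0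
            let c := combined.getD k 0
            let d := combined.getD l 0
            (Amb.contains a && Amb.contains c && (Bma.contains b && Bma.contains d)) ||
            (Bma.contains a && Bma.contains c && (Amb.contains b && Amb.contains d)))

-- ===== PORT B =====
-- port of Source B: sorted symmetric difference, one fold counting label blocks
def weakly_separated_correct_alt (A : List Int) (B : List Int) (n : Int) : Bool :=
  let sa : PySem.Set Int := PySem.Set.ofList A
  let combined := PySem.List.sorted (PySem.Set.symmDiff sa (PySem.Set.ofList B)) (fun x => x) false
  let r := combined.foldl
    (fun (st : Int × Option Bool) x =>
      let lab := PySem.Set.contains sa x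
      if some lab ≠ st.2 then (st.1 + 1, some lab) else st)
    ((0 : Int), (none : Option Bool))
  decide (r.1 < 4)

-- ===== PRECONDITION & SPEC =====
def Spec_weakly_separated_correct (A : List Int) (B : List Int) (n : Int) (out : Bool) : Prop := out = weakly_separated_correct_alt A B n
instance (A : List Int) (B : List Int) (n : Int) (out : Bool) : Decidable (Spec_weakly_separated_correct A B n out) := by unfold Spec_weakly_separated_correct; infer_instance

-- ===== CLAIM (what is proved, stated in full; the proofs are below) =====
def Claim_equal_weakly_separated_correct : Prop := ∀ (A : List Int) (B : List Int) (n : Int), Dom_weakly_separated_correct A B n → Spec_weakly_separated_correct A B n (weakly_separated_correct A B n)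

-- ===== LEMMAS AND PROOFS =====

-- number of blocks (maximal runs) in a Bool list, `last` = label of the previous block
def pvBlocks : Option Bool → List Bool → Nat
  | _, [] => 0
  | last, x :: xs => if some x = last then pvBlocks last xs else pvBlocks (some x) xs + 1

-- alternating Bool list (adjacent elements differ)
def pvAlt : List Bool → Prop
  | [] => True
  | [_] => True
  | a :: b :: t => a ≠ b ∧ pvAlt (b :: t)

-- penalty: 1 if the list starts with exactly the previous block's label
def pvPen : List Bool → Option Bool → Nat
  | a :: _, some b => if a = b then 1 else 0
  | _, _ => 0

theorem pvPen_le_one (t : List Bool) (last : Option Bool) : pvPen t last ≤ 1 := by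
  cases t with
  | nil => simp [pvPen]
  | cons a t => cases last with
    | none => simp [pvPen]
    | some b => simp only [pvPen]; split <;> omega

-- B's fold computes pvBlocks of the label image
theorem pvFold_blocks (f : Int → Bool) (c : List Int) :
    ∀ (k : Int) (last : Option Bool),
    (c.foldl
      (fun (st : Int × Option Bool) x =>
        let lab := f x
        if some lab ≠ st.2 then (st.1 + 1, some lab) else st)
      (k, last)).1 = k + (pvBlocks last (c.map f) : Int) := by
  induction c with
  | nil => intro k last; simp [pvBlocks]
  | cons x xs ih =>
    intro k last
    by_cases h : some (f x) = last
    · simp only [List.foldl_cons, List.map_cons, pvBlocks, h, if_pos rfl]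
      simp only [h, ne_eq, not_true_eq_false, if_false, ite_self]
      exact ih k last
    · simp only [List.foldl_cons, List.map_cons, pvBlocks, if_neg h]
      simp only [ne_eq, h, not_false_eq_true, if_true]
      rw [ih (k + 1) (some (f x))]
      push_cast; ring

-- upper bound: any alternating sublist is at most pvBlocks long (up to the penalty)
theorem pvAlt_len_le {t c : List Bool} (h : t.Sublist c) :
    pvAlt t → ∀ last, t.length ≤ pvBlocks last c + pvPen t last := by
  induction h with
  | slnil => intro _ last; simp [pvPen]
  | @cons t xs y h ih =>
    intro halt last
    by_cases hy : some y = last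
    · simpa [pvBlocks, hy] using ih halt last
    · have h1 := ih halt (some y)
      have h2 := pvPen_le_one t (some y)
      simp only [pvBlocks, if_neg hy]
      omega
  | @cons₂ t xs y h ih =>
    intro halt last
    have halt' : pvAlt t := by
      cases t with
      | nil => trivial
      | cons a t' => exact halt.2
    have hhead : ∀ a t', t = a :: t' → a ≠ y := by
      intro a t' ht; subst ht; exact fun e => halt.1 e.symm
    by_cases hy : some y = last
    · -- t's head differs from y, so pvPen t (some y) = 0, and pvPen (y::t) last = 1
      have hpen : pvPen t (some y) = 0 := by
        cases t with
        | nil => simp [pvPen]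
        | cons a t' => simp [pvPen, hhead a t' rfl]
      have hpen2 : pvPen (y :: t) last = 1 := by
        cases last with
        | none => exact absurd hy (by simp)
        | some b =>
          have : y = b := by injection hy
          simp [pvPen, this]
      have := ih halt' (some y)
      subst hy
      have hb : pvBlocks (some y) (y :: xs) = pvBlocks (some y) xs := by
        simp [pvBlocks]
      rw [hb, hpen2, List.length_cons]
      omega
    · have hpen : pvPen t (some y) = 0 := by
        cases t with
        | nil => simp [pvPen]
        | cons a t' => simp [pvPen, hhead a t' rfl]
      have := ih halt' (some y)
      simp only [pvBlocks, if_neg hy, List.length_cons]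
      omega

-- greedy: there is an alternating sublist of length exactly pvBlocks
theorem pvGreedy (c : List Bool) : ∀ last, ∃ t : List Bool,
    t.Sublist c ∧ pvAlt t ∧ t.length = pvBlocks last c ∧
    (∀ a t', t = a :: t' → some a ≠ last) := by
  induction c with
  | nil => intro last; exact ⟨[], List.Sublist.refl _, trivial, rfl, by intro a t' h; cases h⟩
  | cons x xs ih =>
    intro last
    by_cases h : some x = last
    · obtain ⟨t, hsub, halt, hlen, hhead⟩ := ih last
      exact ⟨t, hsub.cons x, halt, by simp [pvBlocks, h, hlen], hhead⟩
    · obtain ⟨t, hsub, halt, hlen, hhead⟩ := ih (some x)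
      refine ⟨x :: t, hsub.cons₂ x, ?_, by simp [pvBlocks, if_neg h, hlen], ?_⟩
      · cases t with
        | nil => trivial
        | cons a t' =>
          refine ⟨?_, halt⟩
          intro e; exact hhead a t' rfl (by rw [e])
      · intro a t' he
        injection he with e1 _
        intro hc
        exact h (by rw [e1]; exact hc)

-- the Bool pattern test of A's inner condition
theorem pvBoolPattern (la lb lc ld : Bool) :
    ((la && lc && (!lb && !ld)) || (!la && !lc && (lb && ld))) = true ↔
    ∃ x : Bool, la = x ∧ lb = !x ∧ lc = x ∧ ld = !x := by
  revert la lb lc ld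
  decide

-- getD of a mapped list at an in-range index
theorem pvGetD_map (f : Int → Bool) (c : List Int) (i : Nat) (h : i < c.length) :
    (c.map f).getD i false = f (c.getD i 0) := by
  rw [List.getD_eq_getElem (c.map f) false (by simpa using h), List.getElem_map,
      List.getD_eq_getElem c 0 h]

-- core: an alternating quadruple of positions exists iff there are ≥ 4 blocks
theorem pvQuad_iff (ls : List Bool) :
    (∃ i j k l : Nat, i < j ∧ j < k ∧ k < l ∧ l < ls.length ∧
      ∃ x : Bool, ls.getD i false = x ∧ ls.getD j false = !x ∧
                  ls.getD k false = x ∧ ls.getD l false = !x)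
    ↔ 4 ≤ pvBlocks none ls := by
  constructor
  · rintro ⟨i, j, k, l, hij, hjk, hkl, hl, x, hi, hj, hk, hl'⟩
    have hi1 : i < ls.length := by omega
    have hj1 : j < ls.length := by omega
    have hk1 : k < ls.length := by omega
    have hsub : [x, !x, x, !x].Sublist ls := by
      have hp : ([⟨i, hi1⟩, ⟨j, hj1⟩, ⟨k, hk1⟩, ⟨l, hl⟩] : List (Fin ls.length)).Pairwise (· < ·) := by
        refine List.pairwise_cons.mpr ⟨?_, List.pairwise_cons.mpr ⟨?_,
          List.pairwise_cons.mpr ⟨?_, List.pairwise_singleton _ _⟩⟩⟩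
        · intro a ha
          simp only [List.mem_cons, List.not_mem_nil, or_false] at ha
          rcases ha with rfl | rfl | rfl <;> exact Fin.mk_lt_mk.mpr (by omega)
        · intro a ha
          simp only [List.mem_cons, List.not_mem_nil, or_false] at ha
          rcases ha with rfl | rfl <;> exact Fin.mk_lt_mk.mpr (by omega)
        · intro a ha
          simp only [List.mem_cons, List.not_mem_nil, or_false] at ha
          rcases ha with rfl <;> exact Fin.mk_lt_mk.mpr (by omega)
      have := List.map_getElem_sublist hp
      simp only [List.map_cons, List.map_nil] at this
      rw [List.getD_eq_getElem ls false hi1] at hi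
      rw [List.getD_eq_getElem ls false hj1] at hj
      rw [List.getD_eq_getElem ls false hk1] at hk
      rw [List.getD_eq_getElem ls false hl] at hl'
      simpa [hi, hj, hk, hl'] using this
    have halt : pvAlt [x, !x, x, !x] := by cases x <;> simp [pvAlt]
    have := pvAlt_len_le hsub halt none
    simp [pvPen] at this
    omega
  · intro h4
    obtain ⟨t, hsub, halt, hlen, _⟩ := pvGreedy ls none
    rw [← hlen] at h4
    obtain ⟨a, t1, rfl⟩ : ∃ a t1, t = a :: t1 := by
      cases t with | nil => simp at h4 | cons a t1 => exact ⟨a, t1, rfl⟩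
    obtain ⟨b, t2, rfl⟩ : ∃ b t2, t1 = b :: t2 := by
      cases t1 with | nil => simp at h4 | cons b t2 => exact ⟨b, t2, rfl⟩
    obtain ⟨c, t3, rfl⟩ : ∃ c t3, t2 = c :: t3 := by
      cases t2 with | nil => simp at h4 | cons c t3 => exact ⟨c, t3, rfl⟩
    obtain ⟨d, t4, rfl⟩ : ∃ d t4, t3 = d :: t4 := by
      cases t3 with | nil => simp at h4 | cons d t4 => exact ⟨d, t4, rfl⟩
    -- the first four elements alternate, so they are [a, !a, a, !a]
    obtain ⟨h1, h2, h3, _⟩ : a ≠ b ∧ b ≠ c ∧ c ≠ d ∧ pvAlt (d :: t4) := by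
      obtain ⟨u1, rest⟩ := halt
      obtain ⟨u2, rest2⟩ := rest
      obtain ⟨u3, rest3⟩ := rest2
      exact ⟨u1, u2, u3, rest3⟩
    have hne : ∀ x y : Bool, x ≠ y → y = !x := by decide
    have hb : b = !a := hne a b h1
    have hc : c = a := by rw [hne b c h2, hb, Bool.not_not]
    have hd : d = !a := by rw [hne c d h3, hc]
    have hsub4 : [a, !a, a, !a].Sublist ls := by
      have htake : ([a, b, c, d] : List Bool).Sublist (a :: b :: c :: d :: t4) := by
        refine (List.Sublist.cons₂ a (List.Sublist.cons₂ b (List.Sublist.cons₂ c (List.Sublist.cons₂ d ?_))))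
        exact List.nil_sublist t4
      have := htake.trans hsub
      rwa [hb, hc, hd] at this
    obtain ⟨is, his, hp⟩ := List.sublist_eq_map_getElem hsub4
    obtain ⟨i, j, k, l, rfl⟩ : ∃ i j k l : Fin ls.length, is = [i, j, k, l] := by
      have hlen4 : is.length = 4 := by
        have := congrArg List.length his
        simpa using this.symm
      match is, hlen4 with
      | [i, j, k, l], _ => exact ⟨i, j, k, l, rfl⟩
    simp only [List.map_cons, List.map_nil, List.cons.injEq, List.nil_eq] at his
    obtain ⟨e1, e2, e3, e4, _⟩ := his
    simp only [List.pairwise_cons] at hp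
    refine ⟨i, j, k, l, ?_, ?_, ?_, l.isLt, a, ?_, ?_, ?_, ?_⟩
    · exact Fin.lt_def.mp (hp.1 j (by simp))
    · exact Fin.lt_def.mp (hp.2.1 k (by simp))
    · exact Fin.lt_def.mp (hp.2.2.1 l (by simp))
    · rw [List.getD_eq_getElem ls false i.isLt]; exact e1.symm
    · rw [List.getD_eq_getElem ls false j.isLt]; exact e2.symm
    · rw [List.getD_eq_getElem ls false k.isLt]; exact e3.symm
    · rw [List.getD_eq_getElem ls false l.isLt]; exact e4.symm

-- ===== VERDICT (by name: the statement is the Claim_ definition above) =====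
theorem weakly_separated_correct_spec : Claim_equal_weakly_separated_correct := by
  intro A B n _
  unfold Spec_weakly_separated_correct weakly_separated_correct weakly_separated_correct_alt
  simp only []
  set sa : PySem.Set Int := PySem.Set.ofList A with hsa
  set sb : PySem.Set Int := PySem.Set.ofList B with hsb
  set Amb := PySem.List.sorted (PySem.Set.diff sa sb) (fun x => x) false with hAmb
  set Bma := PySem.List.sorted (PySem.Set.diff sb sa) (fun x => x) false with hBma
  set cA := PySem.List.sorted (PySem.Set.ofList (Amb ++ Bma)) (fun x => x) false with hcA
  set cB := PySem.List.sorted (PySem.Set.symmDiff sa sb) (fun x => x) false with hcB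
  -- the two `combined` lists are equal
  have hmemAmb : ∀ x : Int, x ∈ Amb ↔ x ∈ sa ∧ x ∉ sb := by
    intro x
    rw [hAmb, PySem.List.mem_sorted, PySem.Set.mem_diff]
  have hmemBma : ∀ x : Int, x ∈ Bma ↔ x ∈ sb ∧ x ∉ sa := by
    intro x
    rw [hBma, PySem.List.mem_sorted, PySem.Set.mem_diff]
  have hcAB : cA = cB := by
    rw [hcA, hcB]
    apply PySem.List.sorted_eq_sorted_of_perm _ _ _ (fun a b h => h)
    rw [List.perm_ext_iff_of_nodup (PySem.Set.nodup_ofList _)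
      (PySem.Set.nodup_symmDiff _ _ (PySem.Set.nodup_ofList _) (PySem.Set.nodup_ofList _))]
    intro x
    rw [PySem.Set.mem_ofList, List.mem_append, PySem.Set.mem_symmDiff, hmemAmb, hmemBma]
  -- labels of the combined elements
  have hlabA : ∀ x : Int, x ∈ cA → Amb.contains x = PySem.Set.contains sa x := by
    intro x hx
    rw [hcA, PySem.List.mem_sorted, PySem.Set.mem_ofList, List.mem_append] at hx
    rcases hx with hx | hx
    · have h1 := (hmemAmb x).1 hx
      rw [List.contains_iff_mem.mpr ((hmemAmb x).2 h1)]
      exact ((PySem.Set.contains_iff sa x).mpr h1.1).symm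
    · have h1 := (hmemBma x).1 hx
      have h2 : x ∉ Amb := fun hmem => h1.2 ((hmemAmb x).1 hmem).1
      have h3 : Amb.contains x = false := by
        simp [List.contains_iff_mem]; exact h2
      have h4 : PySem.Set.contains sa x = false := by
        cases hch : PySem.Set.contains sa x
        · rfl
        · exact absurd ((PySem.Set.contains_iff sa x).1 hch) h1.2
      rw [h3, h4]
  have hlabB : ∀ x : Int, x ∈ cA → Bma.contains x = !PySem.Set.contains sa x := by
    intro x hx
    rw [hcA, PySem.List.mem_sorted, PySem.Set.mem_ofList, List.mem_append] at hx
    rcases hx with hx | hx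
    · have h1 := (hmemAmb x).1 hx
      have h2 : x ∉ Bma := fun hmem => h1.2 ((hmemBma x).1 hmem).1
      have h3 : Bma.contains x = false := by
        simp [List.contains_iff_mem]; exact h2
      rw [h3, (PySem.Set.contains_iff sa x).mpr h1.1]
      rfl
    · have h1 := (hmemBma x).1 hx
      have h4 : PySem.Set.contains sa x = false := by
        cases hch : PySem.Set.contains sa x
        · rfl
        · exact absurd ((PySem.Set.contains_iff sa x).1 hch) h1.2
      rw [List.contains_iff_mem.mpr ((hmemBma x).2 h1), h4]
      rfl
  -- the label list
  set lab : Int → Bool := fun x => PySem.Set.contains sa x with hlab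
  set ls : List Bool := cA.map lab with hls
  have hlsl : ls.length = cA.length := by rw [hls, List.length_map]
  -- B's side: fold = block count
  have hBside :
      decide ((cB.foldl
        (fun (st : Int × Option Bool) x =>
          let l := PySem.Set.contains sa x
          if some l ≠ st.2 then (st.1 + 1, some l) else st)
        ((0 : Int), (none : Option Bool))).1 < 4)
      = decide (pvBlocks none ls < 4) := by
    rw [← hcAB, pvFold_blocks lab cA 0 none, ← hls]
    norm_num
  -- A's side: the quadruple scan tests 4 ≤ pvBlocks none ls
  have hAside :
      ((List.range cA.length).any fun i =>
        (List.range' (i+1) (cA.length - (i+1))).any fun j =>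
          (List.range' (j+1) (cA.length - (j+1))).any fun k =>
            (List.range' (k+1) (cA.length - (k+1))).any fun l =>
              (Amb.contains (cA.getD i 0) && Amb.contains (cA.getD k 0) &&
                (Bma.contains (cA.getD j 0) && Bma.contains (cA.getD l 0))) ||
              (Bma.contains (cA.getD i 0) && Bma.contains (cA.getD k 0) &&
                (Amb.contains (cA.getD j 0) && Amb.contains (cA.getD l 0))))
      = decide (4 ≤ pvBlocks none ls) := by
    have key : (∃ i ∈ List.range cA.length, ∃ j ∈ List.range' (i+1) (cA.length - (i+1)),
        ∃ k ∈ List.range' (j+1) (cA.length - (j+1)), ∃ l ∈ List.range' (k+1) (cA.length - (k+1)),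
        ((Amb.contains (cA.getD i 0) && Amb.contains (cA.getD k 0) &&
          (Bma.contains (cA.getD j 0) && Bma.contains (cA.getD l 0))) ||
         (Bma.contains (cA.getD i 0) && Bma.contains (cA.getD k 0) &&
          (Amb.contains (cA.getD j 0) && Amb.contains (cA.getD l 0)))) = true)
        ↔ 4 ≤ pvBlocks none ls := by
      rw [← pvQuad_iff ls]
      constructor
      · rintro ⟨i, hi, j, hj, k, hk, l, hl, hcond⟩
        rw [List.mem_range] at hi
        rw [List.mem_range'_1] at hj hk hl
        have hjm : j < cA.length := by omega
        have hkm : k < cA.length := by omega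
        have hlm : l < cA.length := by omega
        have hmemi : cA.getD i 0 ∈ cA := List.getD_eq_getElem cA 0 hi ▸ cA.getElem_mem hi
        have hmemj : cA.getD j 0 ∈ cA := List.getD_eq_getElem cA 0 hjm ▸ cA.getElem_mem hjm
        have hmemk : cA.getD k 0 ∈ cA := List.getD_eq_getElem cA 0 hkm ▸ cA.getElem_mem hkm
        have hmeml : cA.getD l 0 ∈ cA := List.getD_eq_getElem cA 0 hlm ▸ cA.getElem_mem hlm
        rw [hlabA _ hmemi, hlabA _ hmemj, hlabA _ hmemk, hlabA _ hmeml,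
            hlabB _ hmemi, hlabB _ hmemj, hlabB _ hmemk, hlabB _ hmeml] at hcond
        rw [pvBoolPattern] at hcond
        obtain ⟨x, h1, h2, h3, h4⟩ := hcond
        refine ⟨i, j, k, l, by omega, by omega, by omega, by omega, x, ?_, ?_, ?_, ?_⟩
        · rw [hls, pvGetD_map lab cA i hi]; exact h1
        · rw [hls, pvGetD_map lab cA j hjm]; exact h2
        · rw [hls, pvGetD_map lab cA k hkm]; exact h3
        · rw [hls, pvGetD_map lab cA l hlm]; exact h4
      · rintro ⟨i, j, k, l, hij, hjk, hkl, hl, x, h1, h2, h3, h4⟩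
        rw [hlsl] at hl
        have hi : i < cA.length := by omega
        have hjm : j < cA.length := by omega
        have hkm : k < cA.length := by omega
        refine ⟨i, List.mem_range.mpr hi, j, List.mem_range'_1.mpr ⟨by omega, by omega⟩,
          k, List.mem_range'_1.mpr ⟨by omega, by omega⟩,
          l, List.mem_range'_1.mpr ⟨by omega, by omega⟩, ?_⟩
        have hmemi : cA.getD i 0 ∈ cA := List.getD_eq_getElem cA 0 hi ▸ cA.getElem_mem hi
        have hmemj : cA.getD j 0 ∈ cA := List.getD_eq_getElem cA 0 hjm ▸ cA.getElem_mem hjm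
        have hmemk : cA.getD k 0 ∈ cA := List.getD_eq_getElem cA 0 hkm ▸ cA.getElem_mem hkm
        have hmeml : cA.getD l 0 ∈ cA := List.getD_eq_getElem cA 0 hl ▸ cA.getElem_mem hl
        rw [hlabA _ hmemi, hlabA _ hmemj, hlabA _ hmemk, hlabA _ hmeml,
            hlabB _ hmemi, hlabB _ hmemj, hlabB _ hmemk, hlabB _ hmeml]
        rw [pvBoolPattern]
        rw [hls, pvGetD_map lab cA i hi] at h1
        rw [hls, pvGetD_map lab cA j hjm] at h2
        rw [hls, pvGetD_map lab cA k hkm] at h3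
        rw [hls, pvGetD_map lab cA l hl] at h4
        exact ⟨x, h1, h2, h3, h4⟩
    by_cases hP : 4 ≤ pvBlocks none ls
    · rw [decide_eq_true hP]
      rw [← key] at hP
      simpa [List.any_eq_true] using hP
    · rw [decide_eq_false hP]
      rw [← key] at hP
      simpa [List.any_eq_true] using hP
  rw [hAside, hBside]
  by_cases h : 4 ≤ pvBlocks none ls
  · simp [h, Nat.not_lt.mpr h]
  · simp [h, Nat.lt_of_not_le h]
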